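-- pv_equiv track=rewrite | github.com/cohere-ai/cohere-toolkit | src/community/model_deployments/local_model.py | _get_cohere_documents_template
-- ===== SOURCE A (Python) =====
-- from typing import Any, Dict, List
--
-- def _get_cohere_documents_template(
--     documents: List[Dict[str, str]], max_docs: int
-- ) -> str:
--     max_docs = min(max_docs, len(documents))
--     doc_str_list = ["<results>"]
--     for doc_idx, doc in enumerate(documents[:max_docs]):
--         if doc_idx > 0:
--             doc_str_list.append("")
--         doc_str_list.extend([f"Document: {doc_idx}", doc["title"], doc["text"]])
--     doc_str_list.append("</results>")
--     return "\n".join(doc_str_list)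
-- ===== SOURCE B (Python) =====
-- def _get_cohere_documents_template(documents, max_docs):
--     selected = documents[:min(max_docs, len(documents))]
--     n = len(selected)
--
--     def go(i):
--         if i >= n:
--             return "</results>"
--         d = selected[i]
--         sep = "\n" if i + 1 >= n else "\n\n"
--         return f"Document: {i}\n{d['title']}\n{d['text']}" + sep + go(i + 1)
--
--     return "<results>\n" + go(0)
-- ===== Notes on version B (the rewrite author's own statement) =====
-- stated objective: alternative
-- what changed: Replaces A's stateful line-list accumulator plus final join('\n') with a recursive back-to-front build: a helper recurses over document indices, choosing the separator by lookahead and concatenating blocks directly, with no intermediate list and no join.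
import Mathlib
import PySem

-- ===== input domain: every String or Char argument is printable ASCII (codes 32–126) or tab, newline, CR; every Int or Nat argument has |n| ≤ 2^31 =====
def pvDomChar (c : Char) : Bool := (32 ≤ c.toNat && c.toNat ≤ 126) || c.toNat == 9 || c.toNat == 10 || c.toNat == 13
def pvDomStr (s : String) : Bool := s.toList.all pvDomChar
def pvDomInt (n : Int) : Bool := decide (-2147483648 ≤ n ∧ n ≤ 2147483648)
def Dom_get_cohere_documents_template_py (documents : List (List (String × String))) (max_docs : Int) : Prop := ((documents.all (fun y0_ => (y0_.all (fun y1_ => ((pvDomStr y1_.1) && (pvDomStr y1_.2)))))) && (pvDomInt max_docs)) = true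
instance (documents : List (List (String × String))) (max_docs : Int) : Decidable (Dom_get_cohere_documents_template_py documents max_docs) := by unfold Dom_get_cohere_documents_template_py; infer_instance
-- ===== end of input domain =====

-- B builds the template by a recursive back-to-front concatenation over document indices (separator chosen by lookahead), instead of A's line-list accumulator joined by "\n"; objective: alternative.

-- doc[k]: Python dict lookup = first match in the association list; Pre_ guarantees the key is present,
-- so the "" default is never used on admitted inputs.
def pvGetKey (doc : List (String × String)) (k : String) : String :=
  (((doc.find? (fun p => p.1 == k)).map (·.2)).getD "")

-- ===== PORT A =====
def get_cohere_documents_template_py (documents : List (List (String × String))) (max_docs : Int) : String :=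
  let m : Int := min max_docs (documents.length : Int)
  let lst := (PySem.List.enumerate (PySem.List.slice documents none (some m)) 0).foldl
    (fun acc p =>
      (if p.1 > 0 then acc ++ [""] else acc)
        ++ ["Document: " ++ PySem.Int.toStr p.1, pvGetKey p.2 "title", pvGetKey p.2 "text"])
    ["<results>"]
  PySem.Str.join "\n" (lst ++ ["</results>"])

-- ===== PORT B =====
-- Source B's inner function go: recursion on the index; selected[i] never raises since 0 ≤ i < n = len(selected).
def pvGo (selected : List (List (String × String))) (n : Int) (i : Int) : String :=
  if _h : i ≥ n then "</results>"
  else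
    let d := (PySem.List.pyGet? selected i).getD []
    let sep := if i + 1 ≥ n then "\n" else "\n\n"
    "Document: " ++ PySem.Int.toStr i ++ "\n" ++ pvGetKey d "title" ++ "\n" ++ pvGetKey d "text"
      ++ sep ++ pvGo selected n (i + 1)
termination_by (n - i).toNat
decreasing_by omega

def get_cohere_documents_template_py_alt (documents : List (List (String × String))) (max_docs : Int) : String :=
  let selected := PySem.List.slice documents none (some (min max_docs (documents.length : Int)))
  let n : Int := selected.length
  "<results>\n" ++ pvGo selected n 0

-- ===== PRECONDITION & SPEC =====
-- Pre_ excludes exactly the inputs where A raises KeyError: a selected document missing "title" or "text".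
def Pre_get_cohere_documents_template_py (documents : List (List (String × String))) (max_docs : Int) : Prop :=
  ∀ doc ∈ PySem.List.slice documents none (some (min max_docs (documents.length : Int))),
    (doc.find? (fun p => p.1 == "title")).isSome ∧ (doc.find? (fun p => p.1 == "text")).isSome
instance (documents : List (List (String × String))) (max_docs : Int) : Decidable (Pre_get_cohere_documents_template_py documents max_docs) := by unfold Pre_get_cohere_documents_template_py; infer_instance

def pvWitness_get_cohere_documents_template_py : (List (List (String × String))) × Int :=
  ([[("title", "T0"), ("text", "X0")], [("title", "T1"), ("text", "X1")]], 5)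

def Spec_get_cohere_documents_template_py (documents : List (List (String × String))) (max_docs : Int) (out : String) : Prop := out = get_cohere_documents_template_py_alt documents max_docs
instance (documents : List (List (String × String))) (max_docs : Int) (out : String) : Decidable (Spec_get_cohere_documents_template_py documents max_docs out) := by unfold Spec_get_cohere_documents_template_py; infer_instance

-- ===== CLAIM (what is proved, stated in full; the proofs are below) =====
def Claim_equal_get_cohere_documents_template_py : Prop := ∀ (documents : List (List (String × String))) (max_docs : Int), Dom_get_cohere_documents_template_py documents max_docs → Pre_get_cohere_documents_template_py documents max_docs → Spec_get_cohere_documents_template_py documents max_docs (get_cohere_documents_template_py documents max_docs)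

-- ===== LEMMAS AND PROOFS =====

-- the per-document lines A's loop extends the list with (blank-line prefix when idx > 0)
def pvGA (p : Int × List (String × String)) : List String :=
  (if p.1 > 0 then [""] else []) ++ ["Document: " ++ PySem.Int.toStr p.1, pvGetKey p.2 "title", pvGetKey p.2 "text"]

-- the per-document block B's go emits
def pvBlk (p : Int × List (String × String)) : String :=
  "Document: " ++ PySem.Int.toStr p.1 ++ "\n" ++ pvGetKey p.2 "title" ++ "\n" ++ pvGetKey p.2 "text"

theorem pv_join_cons_ne (sep a : List Char) (l : List (List Char)) (h : l ≠ []) :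
    PySem.Chars.join sep (a :: l) = a ++ sep ++ PySem.Chars.join sep l := by
  cases l with
  | nil => exact absurd rfl h
  | cons b t => exact PySem.Chars.join_cons_cons sep a b t

theorem pv_tailJoin (ds : List (List (String × String))) (n : Int) (hn : 1 ≤ n) :
    (PySem.Str.join "\n" ((PySem.List.enumerate ds n).flatMap pvGA ++ ["</results>"])).toList =
    if ds.isEmpty then "</results>".toList
    else '\n' :: (PySem.Str.join "\n\n" ((PySem.List.enumerate ds n).map pvBlk)).toList
      ++ '\n' :: "</results>".toList := by
  induction ds generalizing n with
  | nil =>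
      simp [PySem.List.enumerate_nil, PySem.Str.toList_join, PySem.Chars.join_singleton]
  | cons d ds ih =>
      rw [PySem.List.enumerate_cons]
      have hgt : n > 0 := hn
      simp only [List.flatMap_cons, pvGA, if_pos hgt, List.isEmpty_cons]
      have h1 : "\n".toList = ['\n'] := rfl
      have h2 : "\n\n".toList = ['\n', '\n'] := rfl
      have h0 : "".toList = ([] : List Char) := rfl
      have hih := ih (n + 1) (by omega)
      rw [PySem.Str.toList_join] at hih ⊢
      simp only [List.map_append, List.map_cons, List.map_nil, List.cons_append, List.nil_append] at hih ⊢
      rw [PySem.Chars.join_cons_cons, PySem.Chars.join_cons_cons, PySem.Chars.join_cons_cons,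
        pv_join_cons_ne _ _ _ (by simp), hih]
      by_cases hds : ds = []
      · subst hds
        simp [PySem.List.enumerate_nil, PySem.Str.toList_join, PySem.Chars.join_singleton,
          pvBlk, h1, h2, h0]
      · have hne : ds.isEmpty = false := by simpa using hds
        rw [hne]
        simp only [if_false, Bool.false_eq_true]
        have hmapne : (PySem.List.enumerate ds (n + 1)).map pvBlk ≠ [] := by
          cases ds with
          | nil => exact absurd rfl hds
          | cons a t => simp [PySem.List.enumerate_cons]
        simp only [PySem.Str.toList_join, List.map_cons]
        rw [pv_join_cons_ne _ _ _ (by simpa using hmapne)]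
        simp [pvBlk, h1, h2, h0]

-- A's whole result in closed form: blocks joined by "\n\n" inside the wrapper
theorem pv_main (ds : List (List (String × String))) :
    PySem.Str.join "\n"
      ((PySem.List.enumerate ds 0).foldl
        (fun acc p =>
          (if p.1 > 0 then acc ++ [""] else acc)
            ++ ["Document: " ++ PySem.Int.toStr p.1, pvGetKey p.2 "title", pvGetKey p.2 "text"])
        ["<results>"] ++ ["</results>"]) =
    (if (((PySem.List.enumerate ds 0).map pvBlk).isEmpty) then "<results>\n</results>"
     else "<results>\n" ++ PySem.Str.join "\n\n" ((PySem.List.enumerate ds 0).map pvBlk) ++ "\n</results>") := by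
  have hf : (fun (acc : List String) (p : Int × List (String × String)) =>
      (if p.1 > 0 then acc ++ [""] else acc)
        ++ ["Document: " ++ PySem.Int.toStr p.1, pvGetKey p.2 "title", pvGetKey p.2 "text"]) =
      fun acc p => acc ++ pvGA p := by
    funext acc p
    by_cases h : p.1 > 0 <;> simp [pvGA, h]
  rw [hf, PySem.List.foldl_append_eq_flatMap]
  cases ds with
  | nil => decide
  | cons d ds =>
      rw [PySem.List.enumerate_cons]
      simp only [List.flatMap_cons, List.map_cons, List.isEmpty_cons, pvGA,
        if_neg (by omega : ¬((0 : Int) > 0)), Bool.false_eq_true, if_false]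
      have h1 : "\n".toList = ['\n'] := rfl
      have h2 : "\n\n".toList = ['\n', '\n'] := rfl
      have h0 : "".toList = ([] : List Char) := rfl
      have hih := pv_tailJoin ds 1 le_rfl
      rw [PySem.Str.toList_join] at hih
      simp only [List.map_append, List.map_cons, List.map_nil, List.cons_append] at hih
      rw [← String.toList_inj]
      simp only [PySem.Str.toList_join, List.map_append, List.map_cons, List.map_nil,
        List.cons_append, List.nil_append, zero_add]
      rw [PySem.Chars.join_cons_cons, PySem.Chars.join_cons_cons, PySem.Chars.join_cons_cons,
        pv_join_cons_ne _ _ _ (by simp), hih]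
      by_cases hds : ds = []
      · subst hds
        simp [PySem.List.enumerate_nil, PySem.Chars.join_singleton, pvBlk, h1, h2,
          String.toList_append]
      · have hne : ds.isEmpty = false := by simpa using hds
        rw [hne]
        simp only [Bool.false_eq_true, if_false]
        have hmapne : (PySem.List.enumerate ds 1).map pvBlk ≠ [] := by
          cases ds with
          | nil => exact absurd rfl hds
          | cons a t => simp [PySem.List.enumerate_cons]
        simp only [String.toList_append, PySem.Str.toList_join, List.map_cons]
        rw [pv_join_cons_ne _ _ _ (by simpa using hmapne)]
        simp [pvBlk, h1, h2, String.toList_append]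

-- pvGo in closed form: blocks of the remaining suffix joined by "\n\n", then "\n</results>"
theorem pv_go_spec (ds : List (List (String × String))) :
    ∀ (t : List (List (String × String))) (i : Int), 0 ≤ i → ds.drop i.toNat = t →
    pvGo ds (ds.length : Int) i =
      if t.isEmpty then "</results>"
      else PySem.Str.join "\n\n" ((PySem.List.enumerate t i).map pvBlk) ++ "\n</results>" := by
  intro t
  induction t with
  | nil =>
      intro i hi hdrop
      have hlen : ds.length ≤ i.toNat := by
        by_contra h
        rw [List.drop_eq_nil_iff] at hdrop
        omega
      rw [pvGo, dif_pos (show i ≥ (ds.length : Int) by omega)]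
      simp
  | cons d t ih =>
      intro i hi hdrop
      have hlt : i.toNat < ds.length := by
        by_contra h
        rw [List.drop_eq_nil_iff.2 (by omega)] at hdrop
        simp at hdrop
      have key := List.getElem_cons_drop hlt
      rw [hdrop] at key
      injection key with hget htail
      have hdrop' : ds.drop (i + 1).toNat = t := by
        have he : (i + 1).toNat = i.toNat + 1 := by omega
        rw [he]; exact htail
      have hilt : ¬ (i ≥ (ds.length : Int)) := by omega
      rw [pvGo, dif_neg hilt]
      have hgetopt : (PySem.List.pyGet? ds i).getD [] = d := by
        rw [PySem.List.pyGet?_of_nonneg ds hi]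
        simp [List.getElem?_eq_getElem hlt, hget]
      rw [PySem.List.enumerate_cons]
      simp only [hgetopt, List.isEmpty_cons, Bool.false_eq_true, if_false, List.map_cons]
      have hih := ih (i + 1) (by omega) hdrop'
      by_cases ht : t = []
      · subst ht
        have hsep : i + 1 ≥ (ds.length : Int) := by
          rw [List.drop_eq_nil_iff] at hdrop'
          omega
        rw [if_pos hsep, hih]
        simp only [List.isEmpty_nil, if_true, PySem.List.enumerate_nil, List.map_nil]
        rw [← String.toList_inj]
        simp [PySem.Str.toList_join, PySem.Chars.join_singleton, pvBlk, String.toList_append]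
      · have hsep : ¬ (i + 1 ≥ (ds.length : Int)) := by
          intro hge
          rw [List.drop_eq_nil_iff.2 (by omega)] at hdrop'
          exact ht hdrop'.symm
        rw [if_neg hsep, hih]
        have hne : t.isEmpty = false := by simpa using ht
        rw [hne]
        simp only [Bool.false_eq_true, if_false]
        have hmapne : (PySem.List.enumerate t (i + 1)).map pvBlk ≠ [] := by
          cases t with
          | nil => exact absurd rfl ht
          | cons a s => simp [PySem.List.enumerate_cons]
        rw [← String.toList_inj]
        simp only [String.toList_append, PySem.Str.toList_join, List.map_cons]
        rw [pv_join_cons_ne _ _ _ (by simpa using hmapne)]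
        simp [pvBlk, String.toList_append]

-- the two closed forms coincide
theorem pv_whole (ds : List (List (String × String))) :
    PySem.Str.join "\n"
      ((PySem.List.enumerate ds 0).foldl
        (fun acc p =>
          (if p.1 > 0 then acc ++ [""] else acc)
            ++ ["Document: " ++ PySem.Int.toStr p.1, pvGetKey p.2 "title", pvGetKey p.2 "text"])
        ["<results>"] ++ ["</results>"]) =
    "<results>\n" ++ pvGo ds (ds.length : Int) 0 := by
  rw [pv_main ds, pv_go_spec ds ds 0 le_rfl (by simp)]
  by_cases h : ds = []
  · subst h
    simp [PySem.List.enumerate_nil]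
  · have hne : ds.isEmpty = false := by simpa using h
    have hmapne : ((PySem.List.enumerate ds 0).map pvBlk).isEmpty = false := by
      cases ds with
      | nil => exact absurd rfl h
      | cons a t => simp [PySem.List.enumerate_cons]
    rw [hne, hmapne]
    simp [String.append_assoc]

-- ===== VERDICT (by name: the statement is the Claim_ definition above) =====
theorem get_cohere_documents_template_py_spec : Claim_equal_get_cohere_documents_template_py := by
  intro documents max_docs _hdom _hpre
  unfold Spec_get_cohere_documents_template_py
  unfold get_cohere_documents_template_py get_cohere_documents_template_py_alt
  exact pv_whole (PySem.List.slice documents none (some (min max_docs (documents.length : Int))))
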